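-- pv_equiv track=rewrite | github.com/Mitansh-09/Sanskrit-Env | server/model_agent.py | match_to_option
-- ===== SOURCE A (Python) =====
-- from typing import Any, Dict, List, Optional
--
-- def match_to_option(raw_answer: str, candidate_options: List[str]) -> str:
--     raw = (raw_answer or "").strip()
--
--     for option in candidate_options:
--         if raw == option:
--             return option
--
--     for option in candidate_options:
--         if raw and option.lower().startswith(raw.lower()[:30]):
--             return option
--
--     for option in candidate_options:
--         if option.lower() in raw.lower():
--             return option
--
--     return candidate_options[0] if candidate_options else ""
-- ===== SOURCE B (Python) =====
-- def match_to_option(raw_answer, candidate_options):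
--     raw = (raw_answer or "").strip()
--     low = raw.lower()
--     prefix = low[:30]
--
--     def rank(option):
--         if raw == option:
--             return 0
--         if raw and option.lower().startswith(prefix):
--             return 1
--         if option.lower() in low:
--             return 2
--         return 3
--
--     best_rank, best = 3, None
--     for option in candidate_options:
--         r = rank(option)
--         if r < best_rank:
--             best_rank, best = r, option
--     if best_rank < 3:
--         return best
--     return candidate_options[0] if candidate_options else ""
-- ===== Notes on version B (the rewrite author's own statement) =====
-- stated objective: alternative
-- what changed: Replaces A's three sequential scans over candidate_options with one single pass that assigns each option a match rank (exact=0, prefix=1, substring=2, none=3) and keeps the lowest-rank earliest option.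
import Mathlib
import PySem

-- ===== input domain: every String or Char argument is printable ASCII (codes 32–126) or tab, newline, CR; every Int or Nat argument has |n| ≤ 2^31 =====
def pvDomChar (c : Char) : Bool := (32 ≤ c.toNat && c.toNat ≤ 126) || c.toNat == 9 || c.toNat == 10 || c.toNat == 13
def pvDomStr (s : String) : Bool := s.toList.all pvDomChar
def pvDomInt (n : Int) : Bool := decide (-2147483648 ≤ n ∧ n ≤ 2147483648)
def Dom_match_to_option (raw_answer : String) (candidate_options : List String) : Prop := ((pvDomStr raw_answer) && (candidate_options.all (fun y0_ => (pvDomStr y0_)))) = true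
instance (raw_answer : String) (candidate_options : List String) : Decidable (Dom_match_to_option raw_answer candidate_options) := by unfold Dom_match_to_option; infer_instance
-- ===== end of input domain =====

-- B replaces A's three sequential scans with a single ranked pass (exact=0, prefix=1, substring=2), keeping the lowest-rank earliest option: an alternative decomposition, same cost.


-- ===== PORT A =====
-- (raw_answer or "") is raw_answer itself for strings; .strip() is PySem.Str.strip
def match_to_option (raw_answer : String) (candidate_options : List String) : String :=
  let raw := PySem.Str.strip raw_answer
  match candidate_options.find? (fun option => raw == option) with
  | some option => option
  | none =>
    match candidate_options.find? (fun option =>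
        !(raw == "") && PySem.Str.startswith (PySem.Str.lower option)
          (PySem.Str.slice (PySem.Str.lower raw) none (some 30))) with
    | some option => option
    | none =>
      match candidate_options.find? (fun option =>
          PySem.Str.isIn (PySem.Str.lower option) (PySem.Str.lower raw)) with
      | some option => option
      | none => match candidate_options with | [] => "" | o :: _ => o

-- ===== PORT B =====
def mtoRank (raw low pre option : String) : Nat :=
  if raw == option then 0
  else if !(raw == "") && PySem.Str.startswith (PySem.Str.lower option) pre then 1
  else if PySem.Str.isIn (PySem.Str.lower option) low then 2
  else 3

def mtoLoop (raw low pre : String) : List String → Nat × Option String → Nat × Option String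
  | [], acc => acc
  | o :: t, acc =>
    mtoLoop raw low pre t
      (if mtoRank raw low pre o < acc.1 then (mtoRank raw low pre o, some o) else acc)

def match_to_option_alt (raw_answer : String) (candidate_options : List String) : String :=
  let raw := PySem.Str.strip raw_answer
  let low := PySem.Str.lower raw
  let pre := PySem.Str.slice low none (some 30)
  let best := mtoLoop raw low pre candidate_options (3, none)
  if best.1 < 3 then best.2.getD ""
  else match candidate_options with | [] => "" | o :: _ => o

-- ===== PRECONDITION & SPEC =====
def Spec_match_to_option (raw_answer : String) (candidate_options : List String) (out : String) : Prop := out = match_to_option_alt raw_answer candidate_options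
instance (raw_answer : String) (candidate_options : List String) (out : String) : Decidable (Spec_match_to_option raw_answer candidate_options out) := by unfold Spec_match_to_option; infer_instance

-- ===== CLAIM (what is proved, stated in full; the proofs are below) =====
def Claim_equal_match_to_option : Prop := ∀ (raw_answer : String) (candidate_options : List String), Dom_match_to_option raw_answer candidate_options → Spec_match_to_option raw_answer candidate_options (match_to_option raw_answer candidate_options)

-- ===== LEMMAS AND PROOFS =====

theorem find?_congr_mem {α : Type} (l : List α) (p q : α → Bool)
    (h : ∀ x ∈ l, p x = q x) : l.find? p = l.find? q := by
  induction l with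
  | nil => rfl
  | cons a t ih =>
    simp only [List.find?]
    rw [h a (by simp)]
    cases q a
    · exact ih (fun x hx => h x (by simp [hx]))
    · rfl

def mtoMin (raw low pre : String) (l : List String) (r : Nat) : Nat :=
  l.foldl (fun a o => min a (mtoRank raw low pre o)) r

theorem mtoMin_le (raw low pre : String) (l : List String) (r : Nat) :
    mtoMin raw low pre l r ≤ r ∧ ∀ o ∈ l, mtoMin raw low pre l r ≤ mtoRank raw low pre o := by
  induction l generalizing r with
  | nil => simp [mtoMin]
  | cons a t ih =>
    have h := ih (min r (mtoRank raw low pre a))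
    refine ⟨le_trans h.1 (by omega), ?_⟩
    intro o ho
    rcases List.mem_cons.mp ho with rfl | ho
    · exact le_trans h.1 (by omega)
    · exact h.2 o ho

theorem mtoMin_attained (raw low pre : String) (l : List String) (r : Nat) :
    mtoMin raw low pre l r = r ∨ ∃ o ∈ l, mtoRank raw low pre o = mtoMin raw low pre l r := by
  induction l generalizing r with
  | nil => simp [mtoMin]
  | cons a t ih =>
    have h := ih (min r (mtoRank raw low pre a))
    have hdef : mtoMin raw low pre (a :: t) r = mtoMin raw low pre t (min r (mtoRank raw low pre a)) := rfl
    rcases h with h | ⟨o, ho, he⟩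
    · rw [hdef, h]
      by_cases hle : r ≤ mtoRank raw low pre a
      · left; omega
      · right; exact ⟨a, by simp, by omega⟩
    · right; exact ⟨o, by simp [ho], by rw [hdef, he]⟩

theorem mtoLoop_eq (raw low pre : String) (l : List String) (r : Nat) (b : Option String) :
    mtoLoop raw low pre l (r, b) =
      (if mtoMin raw low pre l r < r
       then (mtoMin raw low pre l r,
             l.find? (fun o => mtoRank raw low pre o == mtoMin raw low pre l r))
       else (r, b)) := by
  induction l generalizing r b with
  | nil => simp [mtoLoop, mtoMin]
  | cons a t ih =>
    have hdef : mtoMin raw low pre (a :: t) r = mtoMin raw low pre t (min r (mtoRank raw low pre a)) := rfl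
    simp only [mtoLoop]
    by_cases hc : mtoRank raw low pre a < r
    · have hmin : min r (mtoRank raw low pre a) = mtoRank raw low pre a := by omega
      rw [if_pos hc, ih, hdef, hmin]
      have hle := (mtoMin_le raw low pre t (mtoRank raw low pre a)).1
      by_cases ht : mtoMin raw low pre t (mtoRank raw low pre a) < mtoRank raw low pre a
      · rw [if_pos ht, if_pos (by omega)]
        have hb : (mtoRank raw low pre a == mtoMin raw low pre t (mtoRank raw low pre a)) = false := by
          simp; omega
        simp only [List.find?, hb]
      · have heq : mtoMin raw low pre t (mtoRank raw low pre a) = mtoRank raw low pre a := by omega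
        rw [if_neg ht, heq, if_pos hc]
        simp only [List.find?, beq_self_eq_true]
    · have hmin : min r (mtoRank raw low pre a) = r := by omega
      rw [if_neg hc, ih, hdef, hmin]
      by_cases ht : mtoMin raw low pre t r < r
      · rw [if_pos ht, if_pos ht]
        have hb : (mtoRank raw low pre a == mtoMin raw low pre t r) = false := by
          simp; omega
        simp only [List.find?, hb]
      · rw [if_neg ht, if_neg ht]

theorem mtoRank_eq_zero_iff (raw low pre o : String) :
    mtoRank raw low pre o = 0 ↔ (raw == o) = true := by
  unfold mtoRank; split_ifs <;> simp_all

theorem mtoRank_eq_one_iff (raw low pre o : String) (h0 : (raw == o) = false) :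
    mtoRank raw low pre o = 1 ↔
      (!(raw == "") && PySem.Str.startswith (PySem.Str.lower o) pre) = true := by
  unfold mtoRank; split_ifs <;> simp_all

theorem mtoRank_eq_two_iff (raw low pre o : String) (h0 : (raw == o) = false)
    (h1 : (!(raw == "") && PySem.Str.startswith (PySem.Str.lower o) pre) = false) :
    mtoRank raw low pre o = 2 ↔ PySem.Str.isIn (PySem.Str.lower o) low = true := by
  unfold mtoRank; split_ifs <;> simp_all

theorem mto_core (raw : String) (l : List String) :
    (match l.find? (fun option => raw == option) with
     | some option => option
     | none =>
       match l.find? (fun option =>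
           !(raw == "") && PySem.Str.startswith (PySem.Str.lower option)
             (PySem.Str.slice (PySem.Str.lower raw) none (some 30))) with
       | some option => option
       | none =>
         match l.find? (fun option =>
             PySem.Str.isIn (PySem.Str.lower option) (PySem.Str.lower raw)) with
         | some option => option
         | none => match l with | [] => "" | o :: _ => o) =
    (if (mtoLoop raw (PySem.Str.lower raw)
          (PySem.Str.slice (PySem.Str.lower raw) none (some 30)) l (3, none)).1 < 3
     then (mtoLoop raw (PySem.Str.lower raw)
          (PySem.Str.slice (PySem.Str.lower raw) none (some 30)) l (3, none)).2.getD ""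
     else match l with | [] => "" | o :: _ => o) := by
  set low := PySem.Str.lower raw with hlow
  set pre := PySem.Str.slice low none (some 30) with hpre
  have hle3 := (mtoMin_le raw low pre l 3).1
  have hlem := (mtoMin_le raw low pre l 3).2
  rw [mtoLoop_eq]
  set m := mtoMin raw low pre l 3 with hm
  cases hf0 : l.find? (fun option => raw == option) with
  | some o =>
    have hpo : (raw == o) = true := List.find?_some hf0
    have hmem : o ∈ l := List.mem_of_find?_eq_some hf0
    have hr0 : mtoRank raw low pre o = 0 := (mtoRank_eq_zero_iff raw low pre o).mpr hpo
    have hm0 : m = 0 := by have := hlem o hmem; omega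
    have hfind : l.find? (fun x => mtoRank raw low pre x == m) = some o := by
      rw [hm0]
      rw [find?_congr_mem l (fun x => mtoRank raw low pre x == 0) (fun x => raw == x)
        (fun x _ => by
          rw [Bool.eq_iff_iff, beq_iff_eq]
          exact mtoRank_eq_zero_iff raw low pre x)]
      exact hf0
    have hmlt : m < 3 := by omega
    simp [hmlt, hfind]
  | none =>
    have hn0 : ∀ x ∈ l, (raw == x) = false := fun x hx =>
      Bool.eq_false_iff.mpr (List.find?_eq_none.mp hf0 x hx)
    have hge1 : ∀ x ∈ l, 1 ≤ mtoRank raw low pre x := by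
      intro x hx
      have hne : mtoRank raw low pre x ≠ 0 := fun h => by
        have h2 := (mtoRank_eq_zero_iff raw low pre x).mp h
        rw [hn0 x hx] at h2
        exact Bool.false_ne_true h2
      omega
    cases hf1 : l.find? (fun option =>
        !(raw == "") && PySem.Str.startswith (PySem.Str.lower option) pre) with
    | some o =>
      have hpo := List.find?_some hf1
      have hmem : o ∈ l := List.mem_of_find?_eq_some hf1
      have hr1 : mtoRank raw low pre o = 1 :=
        (mtoRank_eq_one_iff raw low pre o (hn0 o hmem)).mpr hpo
      have hm1 : m = 1 := by
        have h1 := hlem o hmem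
        rcases mtoMin_attained raw low pre l 3 with h | ⟨w, hw, he⟩
        · rw [← hm] at h; omega
        · have := hge1 w hw; rw [← hm] at he; omega
      have hfind : l.find? (fun x => mtoRank raw low pre x == m) = some o := by
        rw [hm1]
        rw [find?_congr_mem l (fun x => mtoRank raw low pre x == 1)
          (fun x => !(raw == "") && PySem.Str.startswith (PySem.Str.lower x) pre)
          (fun x hx => by
            rw [Bool.eq_iff_iff, beq_iff_eq]
            exact mtoRank_eq_one_iff raw low pre x (hn0 x hx))]
        exact hf1
      have hmlt : m < 3 := by omega
      simp [hmlt, hfind]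
    | none =>
      have hn1 : ∀ x ∈ l,
          (!(raw == "") && PySem.Str.startswith (PySem.Str.lower x) pre) = false := fun x hx =>
        Bool.eq_false_iff.mpr (List.find?_eq_none.mp hf1 x hx)
      have hge2 : ∀ x ∈ l, 2 ≤ mtoRank raw low pre x := by
        intro x hx
        have h1 := hge1 x hx
        have hne : mtoRank raw low pre x ≠ 1 := fun h => by
          have h2 := (mtoRank_eq_one_iff raw low pre x (hn0 x hx)).mp h
          rw [hn1 x hx] at h2
          exact Bool.false_ne_true h2
        omega
      cases hf2 : l.find? (fun option => PySem.Str.isIn (PySem.Str.lower option) low) with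
      | some o =>
        have hpo := List.find?_some hf2
        have hmem : o ∈ l := List.mem_of_find?_eq_some hf2
        have hr2 : mtoRank raw low pre o = 2 :=
          (mtoRank_eq_two_iff raw low pre o (hn0 o hmem) (hn1 o hmem)).mpr hpo
        have hm2 : m = 2 := by
          have h2 := hlem o hmem
          rcases mtoMin_attained raw low pre l 3 with h | ⟨w, hw, he⟩
          · rw [← hm] at h; omega
          · have := hge2 w hw; rw [← hm] at he; omega
        have hfind : l.find? (fun x => mtoRank raw low pre x == m) = some o := by
          rw [hm2]
          rw [find?_congr_mem l (fun x => mtoRank raw low pre x == 2)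
            (fun x => PySem.Str.isIn (PySem.Str.lower x) low)
            (fun x hx => by
              rw [Bool.eq_iff_iff, beq_iff_eq]
              exact mtoRank_eq_two_iff raw low pre x (hn0 x hx) (hn1 x hx))]
          exact hf2
        have hmlt : m < 3 := by omega
        simp [hmlt, hfind]
      | none =>
        have hn2 : ∀ x ∈ l, PySem.Str.isIn (PySem.Str.lower x) low = false := fun x hx =>
          Bool.eq_false_iff.mpr (List.find?_eq_none.mp hf2 x hx)
        have hm3 : m = 3 := by
          rcases mtoMin_attained raw low pre l 3 with h | ⟨w, hw, he⟩
          · rw [← hm] at h; omega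
          · have h2 := hge2 w hw
            have hne : mtoRank raw low pre w ≠ 2 := fun h => by
              have h2 := (mtoRank_eq_two_iff raw low pre w (hn0 w hw) (hn1 w hw)).mp h
              rw [hn2 w hw] at h2
              exact Bool.false_ne_true h2
            have hle : mtoRank raw low pre w ≤ 3 := by
              unfold mtoRank; split_ifs <;> omega
            rw [← hm] at he
            omega
        simp [hm3]

-- ===== VERDICT (by name: the statement is the Claim_ definition above) =====
theorem match_to_option_spec : Claim_equal_match_to_option := by
  intro raw_answer l _
  unfold Spec_match_to_option match_to_option match_to_option_alt
  exact mto_core (PySem.Str.strip raw_answer) l
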